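-- pv_equiv track=rewrite | github.com/menduck/Algorithem | 프로그래머스/lv2/138476. 귤고르기/귤고르기.py | solution
-- ===== SOURCE A (Python) =====
-- from collections import Counter
-- from collections import Counter
--
-- def solution(k, tangerine):
--
--   # 귤 종류 : 개수 딕셔너리 만든 후 개수를 기준으로 내림차순 정렬
--     tangerine_count = sorted(Counter(tangerine).items(),key=lambda x:x[1], reverse=True)
--     # tangerine_count = [(3, 2), (2, 2), (5, 2), (1, 1), (4, 1)]
--
--     result= 0
--     box = 0
--
--     for (_,count) in tangerine_count:
--         box += count
--         result += 1
--         if box >= k: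
--             return result
-- ===== SOURCE B (Python) =====
-- from collections import Counter
--
-- def solution(k, tangerine):
--     counts = Counter(tangerine)
--     max_f = max(counts.values(), default=0)
--     buckets = [0] * (max_f + 1)
--     for c in counts.values():
--         buckets[c] += 1
--     box = 0
--     result = 0
--     for f in range(max_f, 0, -1):
--         for _ in range(buckets[f]):
--             box += f
--             result += 1
--             if box >= k:
--                 return result
-- ===== Notes on version B (the rewrite author's own statement) =====
-- stated objective: alternative
-- what changed: B replaces sorting the (type,count) items by count with a counting-sort frequency-bucket array traversed from the maximum count downward, so no comparison sort and no item list are built.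
-- outside the precondition, e.g. on solution(3, [1]): A returns None, B returns None; on solution(1, []): A returns None, B returns None
import Mathlib
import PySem

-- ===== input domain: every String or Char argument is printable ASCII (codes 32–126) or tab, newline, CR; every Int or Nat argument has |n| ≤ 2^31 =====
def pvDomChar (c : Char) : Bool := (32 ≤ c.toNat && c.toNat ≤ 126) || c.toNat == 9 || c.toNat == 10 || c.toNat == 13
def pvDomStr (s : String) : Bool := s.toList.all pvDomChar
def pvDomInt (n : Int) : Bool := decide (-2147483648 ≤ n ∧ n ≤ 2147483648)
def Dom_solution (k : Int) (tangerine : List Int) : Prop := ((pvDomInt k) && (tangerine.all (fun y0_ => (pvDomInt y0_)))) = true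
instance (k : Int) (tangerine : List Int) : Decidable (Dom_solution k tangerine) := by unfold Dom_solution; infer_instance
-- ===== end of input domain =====

-- B replaces the comparison sort of (type, count) items with counting-sort frequency buckets
-- traversed from the maximum count downward; equivalence of return values is proved on inputs
-- where the Python A returns an int (elsewhere Python A returns None, the ports return 0).

-- ===== PORT A =====
-- the early-return for-loop of A; Python falls off the loop returning None on inputs
-- excluded by Pre_solution, the port returns 0 there
def solutionLoop (k : Int) : List (Int × Int) → Int → Int → Int
  | [], _, _ => 0
  | (_, count) :: rest, box, result =>
      if k ≤ box + count then result + 1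
      else solutionLoop k rest (box + count) (result + 1)

def solution (k : Int) (tangerine : List Int) : Int :=
  solutionLoop k (PySem.List.sorted (PySem.Dict.counter tangerine).items (fun x => x.2) true) 0 0

-- ===== PORT B =====
-- inner loop 'for _ in range(buckets[f])' with early return: none = fell through with updated state
def bInner (k f : Int) : Nat → Int → Int → Option Int × Int × Int
  | 0, box, result => (none, box, result)
  | n + 1, box, result =>
      if k ≤ box + f then (some (result + 1), box + f, result + 1)
      else bInner k f n (box + f) (result + 1)

-- outer loop 'for f in range(max_f, 0, -1)'
def bOuter (k : Int) (buckets : List Int) : Nat → Int → Int → Int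
  | 0, _, _ => 0
  | f + 1, box, result =>
      match bInner k ((f : Int) + 1) ((buckets.getD (f + 1) 0).toNat) box result with
      | (some r, _, _) => r
      | (none, box', result') => bOuter k buckets f box' result'

def solution_alt (k : Int) (tangerine : List Int) : Int :=
  let vals := (PySem.Dict.counter tangerine).values
  let maxF := PySem.List.maxD vals (fun x => x) 0
  let buckets := vals.foldl (fun b c => b.set c.toNat (b.getD c.toNat 0 + 1))
      (List.replicate (maxF.toNat + 1) 0)
  bOuter k buckets maxF.toNat 0 0

-- ===== PRECONDITION & SPEC =====
-- Pre_ excludes the inputs (empty list, or k greater than the number of tangerines) on which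
-- the Python A falls off its loop and returns None, which is not an int.
def Pre_solution (k : Int) (tangerine : List Int) : Prop :=
  tangerine ≠ [] ∧ k ≤ (tangerine.length : Int)
instance (k : Int) (tangerine : List Int) : Decidable (Pre_solution k tangerine) := by
  unfold Pre_solution; infer_instance
def pvWitness_solution : Int × List Int := (2, [1, 2, 1])

def Spec_solution (k : Int) (tangerine : List Int) (out : Int) : Prop := out = solution_alt k tangerine
instance (k : Int) (tangerine : List Int) (out : Int) : Decidable (Spec_solution k tangerine out) := by unfold Spec_solution; infer_instance

-- ===== CLAIM (what is proved, stated in full; the proofs are below) =====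
def Claim_equal_solution : Prop := ∀ (k : Int) (tangerine : List Int), Dom_solution k tangerine → Pre_solution k tangerine → Spec_solution k tangerine (solution k tangerine)

-- ===== LEMMAS AND PROOFS =====

-- the common greedy loop over a bare list of counts
def goCounts (k : Int) : List Int → Int → Int → Int
  | [], _, _ => 0
  | c :: rest, box, result =>
      if k ≤ box + c then result + 1 else goCounts k rest (box + c) (result + 1)

theorem solutionLoop_eq_goCounts (k : Int) (ps : List (Int × Int)) (box result : Int) :
    solutionLoop k ps box result = goCounts k (ps.map (·.2)) box result := by
  induction ps generalizing box result with
  | nil => rfl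
  | cons p rest ih =>
    obtain ⟨a, c⟩ := p
    simp only [solutionLoop, goCounts, List.map]
    split_ifs with h
    · rfl
    · exact ih _ _

-- the flat count sequence that B's nested loops consume
def seqOf (buckets : List Int) : Nat → List Int
  | 0 => []
  | f + 1 => List.replicate (buckets.getD (f + 1) 0).toNat ((f : Int) + 1) ++ seqOf buckets f

theorem goCounts_replicate (k f : Int) (n : Nat) (rest : List Int) (box result : Int) :
    goCounts k (List.replicate n f ++ rest) box result =
      match bInner k f n box result with
      | (some r, _, _) => r
      | (none, box', result') => goCounts k rest box' result' := by
  induction n generalizing box result with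
  | zero => rfl
  | succ n ih =>
    simp only [List.replicate_succ, List.cons_append, goCounts, bInner]
    split_ifs with h
    · rfl
    · exact ih _ _

theorem bOuter_eq_goCounts (k : Int) (buckets : List Int) (f : Nat) (box result : Int) :
    bOuter k buckets f box result = goCounts k (seqOf buckets f) box result := by
  induction f generalizing box result with
  | zero => rfl
  | succ f ih =>
    simp only [bOuter, seqOf, goCounts_replicate]
    cases h : bInner k ((f : Int) + 1) ((buckets.getD (f + 1) 0).toNat) box result with
    | mk o st =>
      cases o with
      | none => simp [ih]
      | some r => simp

theorem mem_seqOf (buckets : List Int) (f : Nat) (x : Int) (hx : x ∈ seqOf buckets f) :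
    1 ≤ x ∧ x ≤ (f : Int) := by
  induction f with
  | zero => simp [seqOf] at hx
  | succ f ih =>
    simp only [seqOf, List.mem_append, List.mem_replicate] at hx
    rcases hx with ⟨-, rfl⟩ | hx
    · constructor <;> omega
    · obtain ⟨h1, h2⟩ := ih hx
      exact ⟨h1, by push_cast; omega⟩

theorem pairwise_seqOf (buckets : List Int) (f : Nat) :
    (seqOf buckets f).Pairwise (fun a b => b ≤ a) := by
  induction f with
  | zero => simp [seqOf]
  | succ f ih =>
    simp only [seqOf]
    refine List.pairwise_append.2 ⟨List.pairwise_replicate.2 (Or.inr (le_refl _)), ih, ?_⟩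
    intro a ha b hb
    rw [List.mem_replicate] at ha
    obtain ⟨-, rfl⟩ := ha
    obtain ⟨-, h2⟩ := mem_seqOf buckets f b hb
    omega

theorem count_seqOf (buckets : List Int) (f : Nat) (x : Int) :
    (seqOf buckets f).count x =
      if 1 ≤ x ∧ x ≤ (f : Int) then (buckets.getD x.toNat 0).toNat else 0 := by
  induction f with
  | zero =>
    simp only [seqOf, List.count_nil]
    split_ifs with h
    · omega
    · rfl
  | succ f ih =>
    simp only [seqOf, List.count_append, List.count_replicate, ih]
    by_cases hx : x = (f : Int) + 1
    · subst hx
      have h1 : ¬ ((f : Int) + 1 ≤ (f : Int)) := by omega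
      have ht : ((f : Int) + 1).toNat = f + 1 := by omega
      simp only [beq_self_eq_true, if_pos, ht]
      rw [if_neg (by omega), if_pos (by push_cast; omega)]
      omega
    · have hbeq : (((f : Int) + 1) == x) = false := by
        simp; omega
      rw [hbeq]
      simp only [Bool.false_eq_true, if_false, zero_add]
      by_cases hr : 1 ≤ x ∧ x ≤ (f : Int)
      · rw [if_pos hr, if_pos ⟨hr.1, by push_cast; omega⟩]
      · rw [if_neg hr, if_neg (by push_cast at hr ⊢; omega)]

-- counting-sort fold: buckets.getD j 0 counts occurrences of j among the processed counts
theorem bucket_fold_getD (m : Nat) (cs : List Int) :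
    ∀ (b : List Int), b.length = m + 1 → (∀ c ∈ cs, 1 ≤ c ∧ c ≤ (m : Int)) →
      ∀ j : Nat, j ≤ m →
        (cs.foldl (fun b c => b.set c.toNat (b.getD c.toNat 0 + 1)) b).getD j 0
          = b.getD j 0 + cs.count (j : Int) := by
  induction cs with
  | nil => intro b hb hcs j hj; simp
  | cons c cs ih =>
    intro b hb hcs j hj
    have hc := hcs c (List.mem_cons_self)
    have hcl : c.toNat < b.length := by omega
    simp only [List.foldl_cons]
    rw [ih _ (by simp [hb]) (fun d hd => hcs d (List.mem_cons_of_mem _ hd)) j hj]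
    simp only [List.count_cons]
    by_cases hxc : (j : Int) = c
    · have hjc : j = c.toNat := by omega
      subst hjc
      simp only [List.getD_eq_getElem?_getD, List.getElem?_set_self (by omega : c.toNat < b.length),
        Option.getD_some]
      simp [hxc]
      ring
    · have hjc : j ≠ c.toNat := by omega
      rw [List.getD_eq_getElem?_getD, List.getElem?_set_ne (by omega : c.toNat ≠ j),
        ← List.getD_eq_getElem?_getD]
      have hb0 : ((c == (j : Int)) : Bool) = false := by
        simp; omega
      simp [hb0]

theorem vals_bounds (tangerine : List Int) (v : Int)
    (hv : v ∈ (PySem.Dict.counter tangerine).values) :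
    1 ≤ v ∧ v ≤ PySem.List.maxD (PySem.Dict.counter tangerine).values (fun x => x) 0 := by
  refine ⟨?_, PySem.List.le_maxD_id _ _ _ hv⟩
  have : (PySem.Dict.counter tangerine).values
      = ((PySem.Dict.counter tangerine).items).map (·.2) := rfl
  rw [this, PySem.Dict.items_counter] at hv
  simp only [List.map_map, List.mem_map, Function.comp] at hv
  obtain ⟨key, hkey, rfl⟩ := hv
  rw [PySem.Set.mem_ofList] at hkey
  have := List.count_pos_iff.2 hkey
  omega

-- the sorted count list of A equals the bucket sequence of B
theorem counts_eq (tangerine : List Int) :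
    (PySem.List.sorted (PySem.Dict.counter tangerine).items (fun x => x.2) true).map (·.2)
      = seqOf
          ((PySem.Dict.counter tangerine).values.foldl
            (fun b c => b.set c.toNat (b.getD c.toNat 0 + 1))
            (List.replicate ((PySem.List.maxD (PySem.Dict.counter tangerine).values (fun x => x) 0).toNat + 1) 0))
          (PySem.List.maxD (PySem.Dict.counter tangerine).values (fun x => x) 0).toNat := by
  set vals := (PySem.Dict.counter tangerine).values with hvals
  set m := (PySem.List.maxD vals (fun x => x) 0).toNat with hm
  set buckets := vals.foldl (fun b c => b.set c.toNat (b.getD c.toNat 0 + 1))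
      (List.replicate (m + 1) (0 : Int)) with hbuckets
  have hvalsB : ∀ c ∈ vals, 1 ≤ c ∧ c ≤ (m : Int) := by
    intro c hc
    obtain ⟨h1, h2⟩ := vals_bounds tangerine c hc
    rw [← hvals] at h2
    exact ⟨h1, by rw [hm]; omega⟩
  -- permutation: both sides are permutations of vals
  have hpermA : ((PySem.List.sorted (PySem.Dict.counter tangerine).items (fun x => x.2) true).map (·.2)).Perm vals := by
    have : vals = ((PySem.Dict.counter tangerine).items).map (·.2) := rfl
    rw [this]
    exact List.Perm.map _ (PySem.List.sorted_perm _ _ _)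
  have hpermB : (seqOf buckets m).Perm vals := by
    rw [List.perm_iff_count]
    intro x
    rw [count_seqOf]
    split_ifs with h
    · rw [hbuckets, bucket_fold_getD m vals (List.replicate (m + 1) 0) (by simp) hvalsB x.toNat (by omega)]
      have hx : ((x.toNat : Int)) = x := by omega
      simp [hx]
    · symm
      rw [List.count_eq_zero]
      intro hx
      exact h (hvalsB x hx)
  -- both sides are sorted in descending order
  have hpwA : ((PySem.List.sorted (PySem.Dict.counter tangerine).items (fun x => x.2) true).map (·.2)).Pairwise
      (fun a b => -a ≤ -b) := by
    rw [List.pairwise_map]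
    have := PySem.List.sorted_pairwise_rev (PySem.Dict.counter tangerine).items (fun x => x.2)
    exact this.imp (fun h => by omega)
  have hpwB : (seqOf buckets m).Pairwise (fun a b : Int => -a ≤ -b) :=
    (pairwise_seqOf buckets m).imp (fun h => by omega)
  exact PySem.List.eq_of_perm_of_pairwise_le_of_injective (fun x : Int => -x)
    neg_injective (hpermA.trans hpermB.symm) hpwA hpwB

-- ===== VERDICT (by name: the statement is the Claim_ definition above) =====
theorem solution_spec : Claim_equal_solution := by
  intro k tangerine _ _
  unfold Spec_solution solution solution_alt
  rw [solutionLoop_eq_goCounts, bOuter_eq_goCounts, counts_eq]
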